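-- pv_equiv track=rewrite | github.com/ChristopherCocuzza/Resume | analysis/plots/thesis/jets.py | find_eta_bins
-- ===== SOURCE A (Python) =====
-- def find_eta_bins(table):
--     ## find the indices of eta bins
--     eta_headers = [_ for _ in table if 'eta' in _]
--     absolute_eta = False
--     for _ in eta_headers:
--         if 'abs' in _:
--             absolute_eta = True
--             break
--
--     eta_bin_indices = []
--     eta_bin_indices.append([0])
--     if absolute_eta:
--         eta_key = 'eta-abs-min'
--     else:
--         eta_key = 'eta-min'
--     for i in range(len(table[eta_key]) - 1):
--         if table[eta_key][i] != table[eta_key][i + 1]: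
--             eta_bin_indices[-1].append(i + 1)
--             eta_bin_indices.append([i + 1])
--     eta_bin_indices[-1].append(len(table[eta_key]))
--
--     return eta_headers, absolute_eta, eta_bin_indices
-- ===== SOURCE B (Python) =====
-- def find_eta_bins(table):
--     ## run-skipping recursion: each bin is one maximal run of equal values in the eta
--     ## column; find its end by skipping ahead, emit [start, end], recurse on the rest
--     eta_headers = [h for h in table if 'eta' in h]
--     absolute_eta = any('abs' in h for h in eta_headers)
--     col = table['eta-abs-min' if absolute_eta else 'eta-min']
--
--     def run_bins(start):
--         end = start + 1
--         while end < len(col) and col[end] == col[start]: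
--             end += 1
--         if end >= len(col):
--             return [[start, len(col)]]
--         return [[start, end]] + run_bins(end)
--
--     return eta_headers, absolute_eta, run_bins(0)
-- ===== Notes on version B (the rewrite author's own statement) =====
-- stated objective: alternative
-- what changed: Replaces A's index loop over all consecutive pairs (mutating the last open bin and opening a new one at each change) with a recursion over maximal runs: an inner while-loop skips to the end of the current run of equal values, emits the [start, end] bin, and recurses from there; the break-scan for 'abs' becomes any().
-- outside the precondition, e.g. on find_eta_bins({'x': [1, 2]}): A raises KeyError, B raises KeyError
import Mathlib
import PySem

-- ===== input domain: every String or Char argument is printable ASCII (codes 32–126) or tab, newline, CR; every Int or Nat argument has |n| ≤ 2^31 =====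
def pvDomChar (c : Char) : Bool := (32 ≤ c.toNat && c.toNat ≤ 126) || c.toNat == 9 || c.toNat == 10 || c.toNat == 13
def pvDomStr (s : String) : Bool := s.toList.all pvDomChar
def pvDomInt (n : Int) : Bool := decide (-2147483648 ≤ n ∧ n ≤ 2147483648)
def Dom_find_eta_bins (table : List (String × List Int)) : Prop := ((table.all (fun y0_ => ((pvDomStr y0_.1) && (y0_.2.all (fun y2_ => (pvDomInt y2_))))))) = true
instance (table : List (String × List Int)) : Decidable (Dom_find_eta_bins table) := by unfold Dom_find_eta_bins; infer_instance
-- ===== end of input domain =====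

-- B replaces A's consecutive-pair change-point loop by a recursion over maximal runs of
-- equal values: an inner loop skips to the end of the current run, that run is one bin,
-- and the recursion continues from there (objective: alternative).

-- ===== PORT A =====
-- A's 'for _ in eta_headers: if 'abs' in _: … break' — a scan that stops at the first hit
def findEtaAbsLoop : List String → Bool
  | [] => false
  | h :: t => if PySem.Str.isIn "abs" h then true else findEtaAbsLoop t

def find_eta_bins (table : List (String × List Int)) : List String × Bool × List (List Int) :=
  let d : PySem.Dict String (List Int) := PySem.Dict.mk table
  let eta_headers := d.keys.filter (fun h => PySem.Str.isIn "eta" h)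
  let absolute_eta := findEtaAbsLoop eta_headers
  let eta_key := if absolute_eta then "eta-abs-min" else "eta-min"
  let col := (d.get? eta_key).getD []
  let n : Int := (col.length : Int)
  -- state = (closed bins, the currently open bin); 'eta_bin_indices[-1].append' closes the open bin
  let st := (PySem.List.pyRange 0 (n - 1) 1).foldl
      (fun (st : List (List Int) × List Int) i =>
        if PySem.List.pyGetD col i 0 != PySem.List.pyGetD col (i + 1) 0 then
          (st.1 ++ [st.2 ++ [i + 1]], [i + 1])
        else st)
      ([], [0])
  (eta_headers, absolute_eta, st.1 ++ [st.2 ++ [n]])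

-- ===== PORT B =====
-- B's inner 'while end < len(col) and col[end] == col[start]: end += 1'
-- (indices stay in range, so col[·] is List.getD with an unreachable default)
def runEnd (col : List Int) (s : Nat) (e : Nat) : Nat :=
  if h : e < col.length ∧ col.getD e 0 = col.getD s 0 then runEnd col s (e + 1) else e
termination_by col.length - e
decreasing_by omega

-- termination of B's recursion: the run end is strictly past the start
theorem runEnd_ge (col : List Int) (s e : Nat) : e ≤ runEnd col s e := by
  unfold runEnd
  split
  · exact le_trans (by omega) (runEnd_ge col s (e + 1))
  · exact le_refl e
termination_by col.length - e
decreasing_by omega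

-- B's 'def run_bins(start): …'
def runBins (col : List Int) (start : Nat) : List (List Int) :=
  let e := runEnd col start (start + 1)
  if col.length ≤ e then [[(start : Int), (col.length : Int)]]
  else [(start : Int), (e : Int)] :: runBins col e
termination_by col.length - start
decreasing_by
  have := runEnd_ge col start (start + 1)
  omega

def find_eta_bins_alt (table : List (String × List Int)) : List String × Bool × List (List Int) :=
  let d : PySem.Dict String (List Int) := PySem.Dict.mk table
  let eta_headers := d.keys.filter (fun h => PySem.Str.isIn "eta" h)
  let absolute_eta := eta_headers.any (fun h => PySem.Str.isIn "abs" h)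
  let col := (d.get? (if absolute_eta then "eta-abs-min" else "eta-min")).getD []
  (eta_headers, absolute_eta, runBins col 0)

-- ===== PRECONDITION & SPEC =====
-- Pre_ excludes exactly the tables where the selected eta key is absent: there Python A raises KeyError.
def Pre_find_eta_bins (table : List (String × List Int)) : Prop :=
  (PySem.Dict.mk table).contains
    (if ((PySem.Dict.mk table).keys.filter (fun h => PySem.Str.isIn "eta" h)).any
          (fun h => PySem.Str.isIn "abs" h)
     then "eta-abs-min" else "eta-min") = true
instance (table : List (String × List Int)) : Decidable (Pre_find_eta_bins table) := by unfold Pre_find_eta_bins; infer_instance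

def pvWitness_find_eta_bins : (List (String × List Int)) := [("eta-min", [1, 1, 2])]

def Spec_find_eta_bins (table : List (String × List Int)) (out : List String × Bool × List (List Int)) : Prop := out = find_eta_bins_alt table
instance (table : List (String × List Int)) (out : List String × Bool × List (List Int)) : Decidable (Spec_find_eta_bins table out) := by unfold Spec_find_eta_bins; infer_instance

-- ===== CLAIM (what is proved, stated in full; the proofs are below) =====
def Claim_equal_find_eta_bins : Prop := ∀ (table : List (String × List Int)), Dom_find_eta_bins table → Pre_find_eta_bins table → Spec_find_eta_bins table (find_eta_bins table)

-- ===== LEMMAS AND PROOFS =====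

-- the break-scan is 'any'
theorem findEtaAbsLoop_eq_any (hs : List String) :
    findEtaAbsLoop hs = hs.any (fun h => PySem.Str.isIn "abs" h) := by
  induction hs with
  | nil => rfl
  | cons h t ih => simp [findEtaAbsLoop, List.any_cons, ih]

-- consecutive pairs of b :: cs, and the last element of b :: cs
def pairsAux : Int → List Int → List (List Int)
  | _, [] => []
  | b, c :: cs => [b, c] :: pairsAux c cs

def lastAux : Int → List Int → Int
  | b, [] => b
  | _, c :: cs => lastAux c cs

-- characterisation of A's fold: state stays (closed bins, singleton open bin)
theorem foldA_eq (r : List Int) (p : Int → Bool) (acc : List (List Int)) (b : Int) :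
    r.foldl (fun (st : List (List Int) × List Int) i =>
        if p i then (st.1 ++ [st.2 ++ [i + 1]], [i + 1]) else st) (acc, [b])
    = (acc ++ pairsAux b ((r.filter p).map (fun i => i + 1)),
       [lastAux b ((r.filter p).map (fun i => i + 1))]) := by
  induction r generalizing acc b with
  | nil => simp [pairsAux, lastAux]
  | cons i t ih =>
      simp only [List.foldl_cons, List.filter_cons]
      by_cases hp : p i
      · simp only [hp, ite_true]
        rw [ih]
        simp [pairsAux, lastAux]
      · simp only [hp, ite_false, Bool.false_eq_true]
        rw [ih]

theorem pairsAux_append_singleton (cs : List Int) (b n : Int) :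
    pairsAux b (cs ++ [n]) = pairsAux b cs ++ [[lastAux b cs, n]] := by
  induction cs generalizing b with
  | nil => rfl
  | cons c cs ih => simp [pairsAux, lastAux, ih]

-- the change points of col that lie at or after index s, shifted by one (as Ints)
def cpsFrom (col : List Int) (s : Nat) : List Int :=
  ((List.range' s (col.length - 1 - s)).filter
      (fun i => col.getD i 0 != col.getD (i + 1) 0)).map (fun i => ((i + 1 : Nat) : Int))

-- everything the while-loop guarantees about the run end
theorem runEnd_spec (col : List Int) (s e : Nat) (he : e ≤ col.length) :
    e ≤ runEnd col s e ∧ runEnd col s e ≤ col.length ∧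
    (∀ k, e ≤ k → k < runEnd col s e → col.getD k 0 = col.getD s 0) ∧
    (runEnd col s e = col.length ∨ col.getD (runEnd col s e) 0 ≠ col.getD s 0) := by
  unfold runEnd
  split
  · rename_i h
    obtain ⟨h1, h2, h3, h4⟩ := runEnd_spec col s (e + 1) (by omega)
    refine ⟨by omega, h2, ?_, h4⟩
    intro k hk1 hk2
    rcases Nat.eq_or_lt_of_le hk1 with rfl | hlt
    · exact h.2
    · exact h3 k hlt hk2
  · rename_i h
    rw [Classical.not_and_iff_not_or_not] at h
    refine ⟨le_refl e, he, by omega, ?_⟩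
    rcases h with h | h
    · left; omega
    · right; exact h
termination_by col.length - e
decreasing_by omega

-- B's recursion produces exactly the consecutive pairs of the change-point list
theorem runBins_eq (col : List Int) (s : Nat) (hs : s < col.length) :
    runBins col s = pairsAux (s : Int) (cpsFrom col s ++ [(col.length : Int)]) := by
  obtain ⟨h1, h2, h3, h4⟩ := runEnd_spec col s (s + 1) (by omega)
  set r := runEnd col s (s + 1) with hr
  have hall : ∀ k, s ≤ k → k < r → col.getD k 0 = col.getD s 0 := by
    intro k hk1 hk2
    rcases Nat.eq_or_lt_of_le hk1 with rfl | hlt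
    · rfl
    · exact h3 k hlt hk2
  rw [runBins]
  simp only [← hr]
  by_cases hend : col.length ≤ r
  · -- last run: no change points at or after s
    have hrl : r = col.length := by omega
    have hcps : cpsFrom col s = [] := by
      unfold cpsFrom
      rw [List.map_eq_nil_iff, List.filter_eq_nil_iff]
      intro i hi
      rw [List.mem_range'_1] at hi
      have e1 : col.getD i 0 = col.getD s 0 := hall i hi.1 (by omega)
      have e2 : col.getD (i + 1) 0 = col.getD s 0 := hall (i + 1) (by omega) (by omega)
      simp only [bne_iff_ne, ne_eq, Decidable.not_not]
      rw [e1, e2]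
    simp [hend, hcps, pairsAux]
  · -- the run ends before the column does: r is the next change point
    have hend' : r < col.length := by omega
    have hne : col.getD r 0 ≠ col.getD s 0 := by
      rcases h4 with h | h
      · omega
      · exact h
    have hsplit : cpsFrom col s = (r : Int) :: cpsFrom col r := by
      unfold cpsFrom
      have hlen : col.length - 1 - s = (r - 1 - s) + (1 + (col.length - 1 - r)) := by omega
      rw [hlen, ← List.range'_append]
      have hmid : List.range' (s + 1 * (r - 1 - s)) (1 + (col.length - 1 - r))
          = (r - 1) :: List.range' r (col.length - 1 - r) := by
        have h1' : s + 1 * (r - 1 - s) = r - 1 := by omega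
        have h2' : 1 + (col.length - 1 - r) = (col.length - 1 - r) + 1 := by omega
        have h3' : (r - 1) + 1 = r := by omega
        rw [h1', h2', List.range'_succ, h3']
      rw [hmid, List.filter_append, List.filter_cons]
      have hfirst : List.filter (fun i => col.getD i 0 != col.getD (i + 1) 0)
          (List.range' s (r - 1 - s)) = [] := by
        rw [List.filter_eq_nil_iff]
        intro i hi
        rw [List.mem_range'_1] at hi
        have e1 : col.getD i 0 = col.getD s 0 := hall i hi.1 (by omega)
        have e2 : col.getD (i + 1) 0 = col.getD s 0 := hall (i + 1) (by omega) (by omega)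
        simp only [bne_iff_ne, ne_eq, Decidable.not_not]
        rw [e1, e2]
      have hcp : (col.getD (r - 1) 0 != col.getD ((r - 1) + 1) 0) = true := by
        have hr1 : (r - 1) + 1 = r := by omega
        have e1 : col.getD (r - 1) 0 = col.getD s 0 := hall (r - 1) (by omega) (by omega)
        rw [hr1, e1]
        simp only [bne_iff_ne, ne_eq]
        exact Ne.symm hne
      rw [hfirst]
      simp only [hcp, if_true, List.nil_append, List.map_cons]
      have hr1 : ((r - 1 + 1 : Nat) : Int) = (r : Int) := by omega
      rw [hr1]
    rw [hsplit]
    have hnot : ¬ col.length ≤ r := not_le.mpr hend'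
    simp only [hnot, ite_false, List.cons_append, pairsAux]
    rw [runBins_eq col r hend']
termination_by col.length - s
decreasing_by omega

-- A's filtered Int range is the Nat change-point list
theorem cps_cast (col : List Int) :
    ((PySem.List.pyRange 0 ((col.length : Int) - 1) 1).filter
        (fun i => PySem.List.pyGetD col i 0 != PySem.List.pyGetD col (i + 1) 0)).map
      (fun i => i + 1) = cpsFrom col 0 := by
  unfold cpsFrom
  rw [PySem.List.pyRange_one]
  have ht : (((col.length : Int) - 1) - 0).toNat = col.length - 1 := by omega
  rw [ht, List.filter_map, List.map_map, List.range_eq_range', Nat.sub_zero]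
  congr 1
  · funext k
    simp only [Function.comp_apply]
    push_cast
    ring
  · congr 1
    funext k
    simp only [Function.comp_apply, zero_add]
    have h2 : ((k : Int) + 1) = ((k + 1 : Nat) : Int) := by push_cast; ring
    rw [PySem.List.pyGetD_natCast, h2, PySem.List.pyGetD_natCast]

-- ===== VERDICT (by name: the statement is the Claim_ definition above) =====
theorem find_eta_bins_spec : Claim_equal_find_eta_bins := by
  intro table _ _
  unfold Spec_find_eta_bins find_eta_bins find_eta_bins_alt
  simp only [findEtaAbsLoop_eq_any]
  refine congrArg _ (congrArg _ ?_)
  rw [foldA_eq]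
  set col := ((PySem.Dict.mk table).get?
      (if ((PySem.Dict.mk table).keys.filter (fun h => PySem.Str.isIn "eta" h)).any
            (fun h => PySem.Str.isIn "abs" h)
       then "eta-abs-min" else "eta-min")).getD [] with hcol
  simp only [List.nil_append, List.singleton_append]
  rw [← pairsAux_append_singleton, cps_cast]
  by_cases h0 : col.length = 0
  · have : col = [] := List.eq_nil_of_length_eq_zero h0
    rw [this]
    rw [runBins]
    simp [runEnd, cpsFrom, pairsAux]
  · rw [runBins_eq col 0 (by omega)]
    norm_num
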